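-- pv_equiv track=rewrite | github.com/CryptoMaN-Rahul/realtoc | enfa2.py | use_dot_for_concatenation
-- ===== SOURCE A (Python) =====
-- def use_dot_for_concatenation(regex):
--     new_regex = ""
--     for i in range(len(regex)-1):
--         cur = regex[i]
--         if cur != '|' and cur != '(':
--             next = regex[i+1]
--             if next != '|' and next != '*' and next != ')':
--                 new_regex += regex[i] + "."
--             else:
--                 new_regex += regex[i]
--         else:
--             new_regex += regex[i]
--     new_regex += regex[-1]
--     return new_regex
-- ===== SOURCE B (Python) =====
-- def use_dot_for_concatenation(regex):
--     # Two staged passes: first interleave a dot between every adjacent pair,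
--     # then delete the dots whose neighbours forbid concatenation.
--     dotted = '.'.join(regex)
--     keep = []
--     for i, ch in enumerate(dotted):
--         if i % 2 and (dotted[i-1] in '|(' or dotted[i+1] in '|*)'):
--             continue
--         keep.append(ch)
--     return ''.join(keep)
-- ===== Notes on version B (the rewrite author's own statement) =====
-- stated objective: alternative
-- what changed: B works in two staged passes: first a dot-separated join interleaves a dot between every adjacent pair, then a filtering pass deletes each interleaved dot whose neighbours forbid concatenation, instead of A's single pairwise scan that decides where to insert dots.
import Mathlib
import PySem

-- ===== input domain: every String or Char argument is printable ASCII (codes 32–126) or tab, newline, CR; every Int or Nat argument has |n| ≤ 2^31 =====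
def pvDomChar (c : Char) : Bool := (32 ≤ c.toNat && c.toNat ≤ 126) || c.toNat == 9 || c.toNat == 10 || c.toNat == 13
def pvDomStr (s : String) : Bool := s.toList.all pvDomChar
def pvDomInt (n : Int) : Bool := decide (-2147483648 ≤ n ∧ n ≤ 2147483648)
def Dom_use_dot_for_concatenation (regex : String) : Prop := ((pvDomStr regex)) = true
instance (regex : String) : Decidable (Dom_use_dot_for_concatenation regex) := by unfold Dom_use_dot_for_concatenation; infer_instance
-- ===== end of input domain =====

-- B replaces A's single pairwise scan by two staged passes: a dot-separated join interleaves a dot between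
-- every adjacent pair, then a filtering pass deletes the dots whose neighbours forbid
-- concatenation (alternative decomposition, same cost). Pre_ excludes only the empty string,
-- where A raises IndexError via regex[-1] (B returns "" there).


-- ===== PORT A =====
-- literal transliteration: accumulator built by a loop over range(len(regex)-1), then regex[-1]
-- appended; pyGet? cs (-1) = none is exactly Python's IndexError on "", excluded by Pre_.
def use_dot_for_concatenation (regex : String) : String :=
  let cs := regex.toList
  let new_regex : List Char :=
    (PySem.List.pyRange 0 ((cs.length : Int) - 1) 1).foldl
      (fun acc i =>
        match PySem.List.pyGet? cs i with
        | none => acc   -- unreachable: i is a valid index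
        | some cur =>
          if cur ≠ '|' ∧ cur ≠ '(' then
            match PySem.List.pyGet? cs (i + 1) with
            | none => acc   -- unreachable: i + 1 ≤ len - 1
            | some nxt =>
              if nxt ≠ '|' ∧ nxt ≠ '*' ∧ nxt ≠ ')' then acc ++ [cur, '.'] else acc ++ [cur]
          else acc ++ [cur]) []
  match PySem.List.pyGet? cs (-1) with
  | none => ""   -- Python raises IndexError here; excluded by Pre_
  | some last => String.ofList (new_regex ++ [last])

-- ===== PORT B =====
-- literal transliteration of Source B: dotted = the dot-separated join of regex's chars (Chars.join over singleton chars),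
-- then the enumerate loop keeps each char unless it is an interleaved dot (odd index) whose
-- neighbours forbid concatenation; 'c in "|("' is ported as the disjunction of char equalities,
-- and pyGet?'s none branch (IndexError, unreachable here) makes the test false.
def dotJoin (cs : List Char) : List Char := PySem.Chars.join ['.'] (cs.map (fun c => [c]))

def dotSkip (dotted : List Char) (i : Int) : Bool :=
  (PySem.Int.mod i 2 != 0) &&
  (((PySem.List.pyGet? dotted (i - 1)).elim false (fun l => l == '|' || l == '(')) ||
   ((PySem.List.pyGet? dotted (i + 1)).elim false (fun r => r == '|' || r == '*' || r == ')')))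

def use_dot_for_concatenation_alt (regex : String) : String :=
  let dotted := dotJoin regex.toList
  let keep : List Char :=
    (PySem.List.enumerate dotted 0).foldl
      (fun acc p => if dotSkip dotted p.1 then acc else acc ++ [p.2]) []
  String.ofList keep

-- ===== PRECONDITION & SPEC =====
-- Pre_ excludes exactly the empty string, on which A raises IndexError (regex[-1]).
def Pre_use_dot_for_concatenation (regex : String) : Prop := regex.toList ≠ []
instance (regex : String) : Decidable (Pre_use_dot_for_concatenation regex) := by unfold Pre_use_dot_for_concatenation; infer_instance
def pvWitness_use_dot_for_concatenation : String := "(a|b)*ab"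

def Spec_use_dot_for_concatenation (regex : String) (out : String) : Prop := out = use_dot_for_concatenation_alt regex
instance (regex : String) (out : String) : Decidable (Spec_use_dot_for_concatenation regex out) := by unfold Spec_use_dot_for_concatenation; infer_instance

-- ===== CLAIM (what is proved, stated in full; the proofs are below) =====
def Claim_equal_use_dot_for_concatenation : Prop := ∀ (regex : String), Dom_use_dot_for_concatenation regex → Pre_use_dot_for_concatenation regex → Spec_use_dot_for_concatenation regex (use_dot_for_concatenation regex)

-- ===== LEMMAS AND PROOFS =====

-- the piece of output both programs contribute for an adjacent pair (c, d)
def piece (c d : Char) : List Char :=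
  c :: (if (c ≠ '|' ∧ c ≠ '(') ∧ (d ≠ '|' ∧ d ≠ '*' ∧ d ≠ ')') then ['.'] else [])

def pieces (cs : List Char) : List Char :=
  (List.range (cs.length - 1)).flatMap (fun k => piece (cs.getD k 'a') (cs.getD (k+1) 'a'))

-- what B's filtering pass emits for one enumerated character
def emit (ds : List Char) (p : Int × Char) : List Char :=
  if dotSkip ds p.1 then [] else [p.2]

-- A's loop produces the concatenation of the pieces of all adjacent pairs
theorem a_fold_eq (cs : List Char) :
    (PySem.List.pyRange 0 ((cs.length : Int) - 1) 1).foldl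
      (fun acc i =>
        match PySem.List.pyGet? cs i with
        | none => acc
        | some cur =>
          if cur ≠ '|' ∧ cur ≠ '(' then
            match PySem.List.pyGet? cs (i + 1) with
            | none => acc
            | some nxt =>
              if nxt ≠ '|' ∧ nxt ≠ '*' ∧ nxt ≠ ')' then acc ++ [cur, '.'] else acc ++ [cur]
          else acc ++ [cur]) []
    = pieces cs := by
  have h1 : PySem.List.pyRange 0 ((cs.length : Int) - 1) 1
      = (List.range (cs.length - 1)).map (fun (k : Nat) => (k : Int)) := by
    rw [PySem.List.pyRange_one]
    have : ((cs.length : Int) - 1 - 0).toNat = cs.length - 1 := by omega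
    rw [this]
    simp only [zero_add]
  rw [h1, List.foldl_map]
  refine Eq.trans (b := (List.range (cs.length - 1)).foldl
      (fun acc k => acc ++ piece (cs.getD k 'a') (cs.getD (k+1) 'a')) []) ?_ ?_
  case refine_2 => rw [PySem.List.foldl_append_eq_flatMap]; simp [pieces]
  refine PySem.List.foldl_congr_mem _ _ _ _ ?_
  intro acc k hk ; rw [List.mem_range] at hk
  have hk1 : k < cs.length := by omega
  have hk2 : k + 1 < cs.length := by omega
  have e1 : PySem.List.pyGet? cs (k : Int) = some cs[k] := by
    simp [List.getElem?_eq_getElem hk1]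
  have e2 : PySem.List.pyGet? cs ((k : Int) + 1) = some cs[k+1] := by
    have e := PySem.List.pyGet?_natCast (xs := cs) (n := k+1)
    push_cast at e
    rw [e, List.getElem?_eq_getElem hk2]
  rw [e1, e2]
  simp only [piece, List.getD_eq_getElem?_getD, List.getElem?_eq_getElem hk1,
    List.getElem?_eq_getElem hk2, Option.getD_some]
  by_cases hc : cs[k] ≠ '|' ∧ cs[k] ≠ '('
  · by_cases hn : cs[k+1] ≠ '|' ∧ cs[k+1] ≠ '*' ∧ cs[k+1] ≠ ')'
    · simp [hc, hn]
    · simp [hc, hn]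
  · simp [hc]

-- structure of '.'.join on a nonempty string: head kept, a dot interleaved before the rest
theorem dotJoin_cons_cons (c d : Char) (r : List Char) :
    dotJoin (c :: d :: r) = c :: '.' :: dotJoin (d :: r) := by
  simp [dotJoin, PySem.Chars.join_cons_cons]

theorem dotJoin_singleton (c : Char) : dotJoin [c] = [c] := by
  simp [dotJoin, PySem.Chars.join_singleton]

-- enumerate with a shifted start is a map over enumerate from that start minus the shift
theorem enumerate_shift {α : Type} (xs : List α) (s t : Int) :
    PySem.List.enumerate xs (s + t) = (PySem.List.enumerate xs s).map (fun p => (p.1 + t, p.2)) := by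
  induction xs generalizing s with
  | nil => simp [PySem.List.enumerate_nil]
  | cons x xs ih =>
    rw [PySem.List.enumerate_cons, PySem.List.enumerate_cons, List.map_cons]
    have : s + t + 1 = (s + 1) + t := by ring
    rw [this, ih]

-- B's fold is the flatten of the emitted pieces
theorem fold_emit (ds : List Char) (l : List (Int × Char)) (acc : List Char) :
    l.foldl (fun acc p => if dotSkip ds p.1 then acc else acc ++ [p.2]) acc
      = acc ++ l.flatMap (emit ds) := by
  have hfun : (fun (acc : List Char) (p : Int × Char) => if dotSkip ds p.1 then acc else acc ++ [p.2])
      = (fun acc p => acc ++ emit ds p) := by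
    funext acc p
    by_cases h : dotSkip ds p.1 <;> simp [emit, h]
  rw [hfun, PySem.List.foldl_append_eq_flatMap]

-- shifting past the two leading characters leaves emit unchanged (index ≥ 0)
theorem emit_shift (a b : Char) (ds : List Char) (k : Nat) (ch : Char) :
    emit (a :: b :: ds) ((k : Int) + 2, ch) = emit ds ((k : Int), ch) := by
  have hmod : PySem.Int.mod ((k : Int) + 2) 2 = PySem.Int.mod (k : Int) 2 := by
    rw [PySem.Int.mod_eq_emod_of_pos (by omega), PySem.Int.mod_eq_emod_of_pos (by omega)]
    omega
  rcases Nat.even_or_odd k with he | ho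
  · have hne : ¬ ((k : Int) % 2 = 1) := by
      obtain ⟨m, hm⟩ := he; omega
    simp [emit, dotSkip, hne]
  · obtain ⟨m, hm⟩ := ho
    have hleft : PySem.List.pyGet? (a :: b :: ds) ((k : Int) + 2 - 1) = PySem.List.pyGet? ds ((k : Int) - 1) := by
      have e0 : (k : Int) + 2 - 1 = (k : Int) + 1 := by ring
      rw [e0, PySem.List.pyGet?_cons_succ]
      have e1 : (k : Int) = ((k - 1 : Nat) : Int) + 1 := by omega
      rw [e1, PySem.List.pyGet?_cons_succ]
      congr 1
      omega
    have hright : PySem.List.pyGet? (a :: b :: ds) ((k : Int) + 2 + 1) = PySem.List.pyGet? ds ((k : Int) + 1) := by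
      have e0 : (k : Int) + 2 + 1 = ((k + 2 : Nat) : Int) + 1 := by push_cast; ring
      rw [e0, PySem.List.pyGet?_cons_succ]
      have e1 : ((k + 2 : Nat) : Int) = ((k + 1 : Nat) : Int) + 1 := by push_cast; ring
      rw [e1, PySem.List.pyGet?_cons_succ]
      congr 1
    simp only [emit, dotSkip, hmod, hleft, hright]

-- B's whole second pass, on the dotted string of a nonempty cs, yields pieces ++ [last]
theorem core_eq : ∀ (cs : List Char) (h : cs ≠ []),
    (PySem.List.enumerate (dotJoin cs) 0).flatMap (emit (dotJoin cs))
      = pieces cs ++ [cs.getLast h] := by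
  intro cs
  induction cs with
  | nil => intro h; exact absurd rfl h
  | cons c rest ih =>
    intro _
    cases rest with
    | nil =>
      simp [dotJoin_singleton, PySem.List.enumerate_cons, PySem.List.enumerate_nil,
        emit, dotSkip, pieces, PySem.Int.mod]
    | cons d r =>
      have hds := dotJoin_cons_cons c d r
      set ds' := dotJoin (d :: r) with hds'
      have hhead : ds' = d :: ds'.tail := by
        cases r with
        | nil => simp [hds', dotJoin_singleton]
        | cons e r' => rw [hds', dotJoin_cons_cons]; rfl
      -- unfold the two leading enumerated entries
      rw [hds, PySem.List.enumerate_cons, PySem.List.enumerate_cons]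
      have hsh : PySem.List.enumerate ds' (0 + 1 + 1)
          = (PySem.List.enumerate ds' 0).map (fun p => (p.1 + 2, p.2)) := by
        have : (0 : Int) + 1 + 1 = 0 + 2 := by ring
        rw [this, enumerate_shift]
      rw [hsh, List.flatMap_cons, List.flatMap_cons]
      simp only [zero_add]
      -- the shifted tail equals the recursive core
      have htail : ((PySem.List.enumerate ds' 0).map (fun p => (p.1 + 2, p.2))).flatMap
            (emit (c :: '.' :: ds'))
          = (PySem.List.enumerate ds' 0).flatMap (emit ds') := by
        rw [List.flatMap_def, List.flatMap_def, List.map_map]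
        refine congrArg _ (List.map_congr_left ?_)
        intro p hp
        rw [PySem.List.mem_enumerate_iff] at hp
        obtain ⟨k, hk, hpk⟩ := hp
        subst hpk
        simpa using emit_shift c '.' ds' k ds'[k]
      rw [htail, ih (by simp)]
      -- head entries: emit at index 0 is [c]; at index 1 it is the dot decision = tail of piece c d
      have h0 : emit (c :: '.' :: ds') (0, c) = [c] := by
        simp [emit, dotSkip, PySem.Int.mod]
      have hg0 : PySem.List.pyGet? (c :: '.' :: ds') ((1 : Int) - 1) = some c := by
        have e0 : (1 : Int) - 1 = 0 := by norm_num
        rw [e0, PySem.List.pyGet?_zero_cons]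
      have hg2 : PySem.List.pyGet? (c :: '.' :: ds') ((1 : Int) + 1) = some d := by
        have e : (1 : Int) + 1 = ((2 : Nat) : Int) := by norm_num
        rw [e, PySem.List.pyGet?_natCast, hhead]
        rfl
      have h1 : emit (c :: '.' :: ds') (1, '.')
          = if (c ≠ '|' ∧ c ≠ '(') ∧ (d ≠ '|' ∧ d ≠ '*' ∧ d ≠ ')') then ['.'] else [] := by
        simp only [emit, dotSkip, hg0, hg2, Option.elim]
        by_cases hc1 : c = '|' <;> by_cases hc2 : c = '(' <;> by_cases hd1 : d = '|' <;>
          by_cases hd2 : d = '*' <;> by_cases hd3 : d = ')' <;>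
          simp [hc1, hc2, hd1, hd2, hd3, PySem.Int.mod]
      rw [h0, h1]
      -- pieces (c :: d :: r) splits off piece c d
      have hp : pieces (c :: d :: r) = piece c d ++ pieces (d :: r) := by
        simp only [pieces, List.length_cons]
        have e : r.length + 1 + 1 - 1 = r.length + 1 := by omega
        have e2 : r.length + 1 - 1 = r.length := by omega
        rw [e, e2, List.range_succ_eq_map, List.flatMap_cons]
        congr 1
        rw [List.flatMap_def, List.flatMap_def, List.map_map]
        refine congrArg _ (List.map_congr_left ?_)
        intro k _
        simp [Nat.succ_eq_add_one]
      rw [hp]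
      have hlast : (c :: d :: r).getLast (by simp) = (d :: r).getLast (by simp) :=
        List.getLast_cons (by simp)
      simp only [piece, hlast, List.append_assoc, List.cons_append, List.nil_append]

-- ===== VERDICT (by name: the statement is the Claim_ definition above) =====
theorem use_dot_for_concatenation_spec : Claim_equal_use_dot_for_concatenation := by
  intro regex _ hpre
  unfold Spec_use_dot_for_concatenation
  simp only [use_dot_for_concatenation, use_dot_for_concatenation_alt]
  rw [a_fold_eq, PySem.List.pyGet?_neg_one, List.getLast?_eq_some_getLast hpre,
    fold_emit, core_eq regex.toList hpre]
  rfl
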